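-- pv_equiv track=rewrite | github.com/Princeton-SysML/FILM | reorder.py | shard_sequence_using_eos
-- ===== SOURCE A (Python) =====
-- def shard_sequence_using_eos(input, sep_token_id=50256):
--     ret = []
--     start = 0
--     for i in range(len(input)):
--         if input[i] == sep_token_id:
--             ret.append(input[start:i])
--             start = i + 1
--     ret.append(input[start:])
--     return ret
-- ===== SOURCE B (Python) =====
-- def shard_sequence_using_eos(input, sep_token_id=50256):
--     ret = []
--     rest = input
--     while sep_token_id in rest:
--         cut = rest.index(sep_token_id)
--         ret.append(rest[:cut])
--         rest = rest[cut + 1:]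
--     ret.append(rest)
--     return ret
-- ===== Notes on version B (the rewrite author's own statement) =====
-- stated objective: alternative
-- what changed: B repeatedly consumes the sequence: find the first separator with membership/.index, cut off the head shard, and loop on the shrinking remainder, instead of A's single index loop over the fixed input with a start pointer.
import Mathlib
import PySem

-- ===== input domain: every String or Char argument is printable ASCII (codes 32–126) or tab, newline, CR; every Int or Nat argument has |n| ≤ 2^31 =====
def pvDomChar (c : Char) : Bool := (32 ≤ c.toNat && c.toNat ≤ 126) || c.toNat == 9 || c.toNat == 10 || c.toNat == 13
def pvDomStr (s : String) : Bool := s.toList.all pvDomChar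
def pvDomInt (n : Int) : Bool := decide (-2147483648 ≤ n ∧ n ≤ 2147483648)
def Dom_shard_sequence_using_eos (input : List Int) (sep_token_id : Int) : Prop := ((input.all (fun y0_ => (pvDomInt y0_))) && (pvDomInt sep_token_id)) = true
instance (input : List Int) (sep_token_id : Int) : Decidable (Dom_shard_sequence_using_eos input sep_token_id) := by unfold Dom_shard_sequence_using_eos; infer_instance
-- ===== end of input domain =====

-- B splits by repeatedly consuming the sequence at its first separator (membership + index + cut)
-- instead of A's index loop over the fixed input with a start pointer (objective: alternative).

-- ===== PORT A =====
def shard_sequence_using_eos (input : List Int) (sep_token_id : Int) : List (List Int) :=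
  let st := (PySem.List.pyRange 0 (input.length : Int) 1).foldl
    (fun (s : List (List Int) × Int) i =>
      if PySem.List.pyGetD input i 0 = sep_token_id then
        (s.1 ++ [PySem.List.slice input (some s.2) (some i)], i + 1)
      else s) ([], 0)
  st.1 ++ [PySem.List.slice input (some st.2) none]

-- ===== PORT B =====
-- Source B's while loop: state = (ret, rest); each step cuts the head shard off rest at its
-- first separator (rest.index) and continues on the remainder.
def pvAltGo (sep_token_id : Int) (ret : List (List Int)) (rest : List Int) : List (List Int) :=
  if h : sep_token_id ∈ rest then
    let cut : Nat := (PySem.List.index? rest sep_token_id).getD 0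
    pvAltGo sep_token_id (ret ++ [PySem.List.slice rest none (some (cut : Int))])
      (PySem.List.slice rest (some ((cut : Int) + 1)) none)
  else ret ++ [rest]
termination_by rest.length
decreasing_by
  have hne : 0 < rest.length := List.length_pos_iff.mpr (by rintro rfl; simp at h)
  have hc : ((cut : Int) + 1) = (((cut + 1 : Nat) : Int)) := by push_cast; ring
  rw [hc, PySem.List.slice_from_natCast]
  simp only [List.length_drop]
  omega

def shard_sequence_using_eos_alt (input : List Int) (sep_token_id : Int) : List (List Int) :=
  pvAltGo sep_token_id [] input

-- ===== PRECONDITION & SPEC =====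
def Spec_shard_sequence_using_eos (input : List Int) (sep_token_id : Int) (out : List (List Int)) : Prop := out = shard_sequence_using_eos_alt input sep_token_id
instance (input : List Int) (sep_token_id : Int) (out : List (List Int)) : Decidable (Spec_shard_sequence_using_eos input sep_token_id out) := by unfold Spec_shard_sequence_using_eos; infer_instance

-- ===== CLAIM (what is proved, stated in full; the proofs are below) =====
def Claim_equal_shard_sequence_using_eos : Prop := ∀ (input : List Int) (sep_token_id : Int), Dom_shard_sequence_using_eos input sep_token_id → Spec_shard_sequence_using_eos input sep_token_id (shard_sequence_using_eos input sep_token_id)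

-- ===== LEMMAS AND PROOFS =====

-- dropping the first-shard prefix and its separator leaves the suffix
theorem pv_drop_mid (pre suf : List Int) (sep : Int) :
    (pre ++ sep :: suf).drop (pre.length + 1) = suf := by
  have h : pre ++ sep :: suf = (pre ++ [sep]) ++ suf := by simp
  have hl : pre.length + 1 = (pre ++ [sep]).length := by simp
  rw [h, hl, List.drop_left]

-- A's fold leaves the state unchanged on indices carrying no separator
theorem pvA_fold_const (input : List Int) (sep : Int) (l : List Int) (s : List (List Int) × Int)
    (hl : ∀ j ∈ l, PySem.List.pyGetD input j 0 ≠ sep) :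
    l.foldl (fun (s : List (List Int) × Int) i =>
      if PySem.List.pyGetD input i 0 = sep then
        (s.1 ++ [PySem.List.slice input (some s.2) (some i)], i + 1)
      else s) s = s := by
  induction l generalizing s with
  | nil => rfl
  | cons a t ih =>
      simp only [List.foldl_cons]
      rw [if_neg (hl a (List.mem_cons_self))]
      exact ih s (fun j hj => hl j (List.mem_cons_of_mem _ hj))

-- A on a separator-free input is the singleton shard
theorem pvA_no_sep (input : List Int) (sep : Int) (hs : sep ∉ input) :
    shard_sequence_using_eos input sep = [input] := by
  unfold shard_sequence_using_eos
  rw [pvA_fold_const]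
  · simp [PySem.List.slice_zero_start, PySem.List.slice_none_none]
  · intro j hj
    rw [PySem.List.mem_pyRange_one] at hj
    rw [PySem.List.pyGetD_of_nonneg _ _ hj.1]
    intro hEq
    apply hs
    rw [← hEq]
    rw [List.getD_eq_getElem?_getD, List.getElem?_eq_getElem (by omega)]
    simp

-- fold accumulator extraction: the appended chunks do not depend on the accumulator
theorem pvA_fold_acc (input : List Int) (sep : Int) (l : List Int)
    (acc : List (List Int)) (t : Int) :
    l.foldl (fun (s : List (List Int) × Int) i =>
      if PySem.List.pyGetD input i 0 = sep then
        (s.1 ++ [PySem.List.slice input (some s.2) (some i)], i + 1)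
      else s) (acc, t)
    = (acc ++ (l.foldl (fun (s : List (List Int) × Int) i =>
      if PySem.List.pyGetD input i 0 = sep then
        (s.1 ++ [PySem.List.slice input (some s.2) (some i)], i + 1)
      else s) ([], t)).1,
      (l.foldl (fun (s : List (List Int) × Int) i =>
      if PySem.List.pyGetD input i 0 = sep then
        (s.1 ++ [PySem.List.slice input (some s.2) (some i)], i + 1)
      else s) ([], t)).2) := by
  induction l generalizing acc t with
  | nil => simp
  | cons a tl ih =>
      simp only [List.foldl_cons]
      by_cases hc : PySem.List.pyGetD input a 0 = sep
      · rw [if_pos hc, if_pos hc]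
        rw [ih (acc ++ [PySem.List.slice input (some t) (some a)]) (a+1),
            ih ([] ++ [PySem.List.slice input (some t) (some a)]) (a+1)]
        simp
      · rw [if_neg hc, if_neg hc, ih acc t]

-- shifting the fold from input = pre ++ sep :: suf down to suf (indices shifted by pre.length + 1)
theorem pvA_fold_shift (pre suf : List Int) (sep : Int) (l : List Int) (acc : List (List Int)) (t : Int)
    (ht : 0 ≤ t) (hl : ∀ j ∈ l, 0 ≤ j) :
    l.foldl (fun (s : List (List Int) × Int) j =>
      if PySem.List.pyGetD (pre ++ sep :: suf) (((pre.length + 1 : Nat) : Int) + j) 0 = sep then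
        (s.1 ++ [PySem.List.slice (pre ++ sep :: suf) (some s.2) (some (((pre.length + 1 : Nat) : Int) + j))],
          ((pre.length + 1 : Nat) : Int) + j + 1)
      else s) (acc, ((pre.length + 1 : Nat) : Int) + t)
    = ((l.foldl (fun (s : List (List Int) × Int) j =>
        if PySem.List.pyGetD suf j 0 = sep then
          (s.1 ++ [PySem.List.slice suf (some s.2) (some j)], j + 1)
        else s) (acc, t)).1,
       ((pre.length + 1 : Nat) : Int) + (l.foldl (fun (s : List (List Int) × Int) j =>
        if PySem.List.pyGetD suf j 0 = sep then
          (s.1 ++ [PySem.List.slice suf (some s.2) (some j)], j + 1)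
        else s) (acc, t)).2) := by
  induction l generalizing acc t with
  | nil => rfl
  | cons a tl ih =>
      have ha : 0 ≤ a := hl a List.mem_cons_self
      have hget : PySem.List.pyGetD (pre ++ sep :: suf) (((pre.length + 1 : Nat) : Int) + a) 0
          = PySem.List.pyGetD suf a 0 := by
        rw [PySem.List.pyGetD_of_nonneg _ _ (by omega),
            PySem.List.pyGetD_of_nonneg _ _ ha]
        have hidx : (((pre.length + 1 : Nat) : Int) + a).toNat = (pre.length + 1) + a.toNat := by omega
        rw [List.getD_eq_getElem?_getD, List.getD_eq_getElem?_getD, hidx,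
            ← List.getElem?_drop (i := pre.length + 1), pv_drop_mid]
      have hslice : PySem.List.slice (pre ++ sep :: suf)
            (some (((pre.length + 1 : Nat) : Int) + t)) (some (((pre.length + 1 : Nat) : Int) + a))
          = PySem.List.slice suf (some t) (some a) := by
        rw [PySem.List.slice_toNat _ (by omega) (by omega),
            PySem.List.slice_toNat _ ht ha]
        have h1 : (((pre.length + 1 : Nat) : Int) + t).toNat = (pre.length + 1) + t.toNat := by omega
        rw [h1]
        have h2 : (((pre.length + 1 : Nat) : Int) + a).toNat
            - ((pre.length + 1) + t.toNat) = a.toNat - t.toNat := by omega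
        rw [h2, ← List.drop_drop, pv_drop_mid]
      simp only [List.foldl_cons]
      by_cases hc : PySem.List.pyGetD suf a 0 = sep
      · rw [if_pos (by rw [hget]; exact hc), if_pos hc]
        have harr : ((pre.length + 1 : Nat) : Int) + a + 1 = ((pre.length + 1 : Nat) : Int) + (a + 1) := by ring
        rw [hslice, harr]
        exact ih _ (a+1) (by omega) (fun j hj => hl j (List.mem_cons_of_mem _ hj))
      · rw [if_neg (by rw [hget]; exact hc), if_neg hc]
        exact ih acc t ht (fun j hj => hl j (List.mem_cons_of_mem _ hj))

-- the fold keeps its start pointer nonnegative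
theorem pvA_fold_nonneg (input : List Int) (sep : Int) (l : List Int) (acc : List (List Int)) (t : Int)
    (ht : 0 ≤ t) (hl : ∀ j ∈ l, 0 ≤ j) :
    0 ≤ (l.foldl (fun (s : List (List Int) × Int) i =>
      if PySem.List.pyGetD input i 0 = sep then
        (s.1 ++ [PySem.List.slice input (some s.2) (some i)], i + 1)
      else s) (acc, t)).2 := by
  induction l generalizing acc t with
  | nil => exact ht
  | cons a tl ih =>
      have ha : 0 ≤ a := hl a List.mem_cons_self
      simp only [List.foldl_cons]
      by_cases hc : PySem.List.pyGetD input a 0 = sep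
      · rw [if_pos hc]
        exact ih _ (a+1) (by omega) (fun j hj => hl j (List.mem_cons_of_mem _ hj))
      · rw [if_neg hc]
        exact ih acc t ht (fun j hj => hl j (List.mem_cons_of_mem _ hj))

-- cutting A at the first separator: A (pre ++ sep :: suf) = pre :: A suf
theorem pvA_cut (pre suf : List Int) (sep : Int) (hpre : sep ∉ pre) :
    shard_sequence_using_eos (pre ++ sep :: suf) sep = pre :: shard_sequence_using_eos suf sep := by
  have hsplit : PySem.List.pyRange 0 ((pre ++ sep :: suf).length : Int) 1
      = PySem.List.pyRange 0 ((pre.length : Int) + 1) 1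
        ++ PySem.List.pyRange ((pre.length : Int) + 1) ((pre ++ sep :: suf).length : Int) 1 := by
    apply PySem.List.pyRange_one_append
    · omega
    · simp
  unfold shard_sequence_using_eos
  rw [hsplit, List.foldl_append,
      PySem.List.pyRange_one_succ_right (a := 0) (b := (pre.length : Int)) (by omega),
      List.foldl_append]
  rw [pvA_fold_const (pre ++ sep :: suf) sep _ ([], 0) (by
    intro j hj
    rw [PySem.List.mem_pyRange_one] at hj
    rw [PySem.List.pyGetD_of_nonneg _ _ hj.1]
    intro hEq
    apply hpre
    rw [← hEq]
    have hjlt : j.toNat < pre.length := by omega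
    rw [List.getD_eq_getElem?_getD, List.getElem?_append_left hjlt,
        List.getElem?_eq_getElem hjlt]
    exact List.getElem_mem hjlt)]
  have hgetsep : PySem.List.pyGetD (pre ++ sep :: suf) ((pre.length : Int)) 0 = sep := by
    rw [PySem.List.pyGetD_of_nonneg _ _ (by omega)]
    simp [List.getD_eq_getElem?_getD]
  simp only [List.foldl_cons, List.foldl_nil]
  rw [if_pos hgetsep]
  have hslice0 : PySem.List.slice (pre ++ sep :: suf) (some ((0:Int))) (some ((pre.length : Int))) = pre := by
    rw [PySem.List.slice_toNat _ (by norm_num) (by omega)]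
    simp
  simp only [List.nil_append]
  rw [hslice0]
  have hrw : PySem.List.pyRange ((pre.length : Int) + 1) ((pre ++ sep :: suf).length : Int) 1
      = (PySem.List.pyRange 0 (suf.length : Int) 1).map (fun j => ((pre.length + 1 : Nat) : Int) + j) := by
    rw [PySem.List.pyRange_one, PySem.List.pyRange_one]
    have hn : (((pre ++ sep :: suf).length : Int) - ((pre.length : Int) + 1)).toNat
        = ((suf.length : Int) - 0).toNat := by simp
    rw [hn, List.map_map]
    apply List.map_congr_left
    intro k _
    simp only [Function.comp_apply]
    push_cast
    ring
  rw [hrw, List.foldl_map]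
  have hstart : ((pre.length : Int) + 1) = ((pre.length + 1 : Nat) : Int) + (0:Int) := by push_cast; ring
  rw [hstart]
  rw [pvA_fold_shift pre suf sep _ [pre] 0 (le_refl 0) (by
    intro j hj
    rw [PySem.List.mem_pyRange_one] at hj
    exact hj.1)]
  have hnn : 0 ≤ ((PySem.List.pyRange 0 (suf.length : Int) 1).foldl (fun (s : List (List Int) × Int) j =>
        if PySem.List.pyGetD suf j 0 = sep then
          (s.1 ++ [PySem.List.slice suf (some s.2) (some j)], j + 1)
        else s) ([pre], 0)).2 := by
    apply pvA_fold_nonneg suf sep _ [pre] 0 (le_refl 0)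
    intro j hj
    rw [PySem.List.mem_pyRange_one] at hj
    exact hj.1
  have hfinal : PySem.List.slice (pre ++ sep :: suf)
      (some (((pre.length + 1 : Nat) : Int) + ((PySem.List.pyRange 0 (suf.length : Int) 1).foldl (fun (s : List (List Int) × Int) j =>
        if PySem.List.pyGetD suf j 0 = sep then
          (s.1 ++ [PySem.List.slice suf (some s.2) (some j)], j + 1)
        else s) ([pre], 0)).2)) none
      = PySem.List.slice suf (some ((PySem.List.pyRange 0 (suf.length : Int) 1).foldl (fun (s : List (List Int) × Int) j =>
        if PySem.List.pyGetD suf j 0 = sep then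
          (s.1 ++ [PySem.List.slice suf (some s.2) (some j)], j + 1)
        else s) ([pre], 0)).2) none := by
    rw [PySem.List.slice_from _ (by omega), PySem.List.slice_from _ hnn]
    have h1 : (((pre.length + 1 : Nat) : Int) + ((PySem.List.pyRange 0 (suf.length : Int) 1).foldl (fun (s : List (List Int) × Int) j =>
        if PySem.List.pyGetD suf j 0 = sep then
          (s.1 ++ [PySem.List.slice suf (some s.2) (some j)], j + 1)
        else s) ([pre], 0)).2).toNat = (pre.length + 1) + ((PySem.List.pyRange 0 (suf.length : Int) 1).foldl (fun (s : List (List Int) × Int) j =>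
        if PySem.List.pyGetD suf j 0 = sep then
          (s.1 ++ [PySem.List.slice suf (some s.2) (some j)], j + 1)
        else s) ([pre], 0)).2.toNat := by omega
    rw [h1, ← List.drop_drop, pv_drop_mid]
  rw [hfinal]
  rw [pvA_fold_acc suf sep _ [pre] 0]
  simp

-- B's loop accumulates exactly A's shards
theorem pvAltGo_eq (sep : Int) : ∀ (n : Nat) (rest : List Int), rest.length ≤ n →
    ∀ (ret : List (List Int)), pvAltGo sep ret rest = ret ++ shard_sequence_using_eos rest sep := by
  intro n
  induction n with
  | zero =>
      intro rest hr ret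
      have hnil : rest = [] := by cases rest <;> simp_all
      subst hnil
      rw [pvAltGo, dif_neg (by simp), pvA_no_sep _ _ (by simp)]
  | succ n ih =>
      intro rest hr ret
      by_cases h : sep ∈ rest
      · rw [pvAltGo, dif_pos h]
        obtain ⟨i, hi⟩ := Option.isSome_iff_exists.mp ((PySem.List.index?_isSome_iff rest sep).mpr h)
        obtain ⟨pre, suf, hrest, hk, hpre⟩ := (PySem.List.index?_eq_some_iff rest sep i).1 hi
        simp only [hi, Option.getD_some]
        have hslice1 : PySem.List.slice rest none (some (i : Int)) = pre := by
          rw [PySem.List.slice_to _ (by positivity), hrest]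
          simp [← hk]
        have hslice2 : PySem.List.slice rest (some ((i : Int) + 1)) none = suf := by
          have hc : ((i : Int) + 1) = (((i + 1 : Nat) : Int)) := by push_cast; ring
          rw [hc, PySem.List.slice_from_natCast, hrest, ← hk, pv_drop_mid]
        rw [hslice1, hslice2]
        rw [ih suf (by rw [hrest] at hr; simp at hr; omega) (ret ++ [pre])]
        rw [hrest, pvA_cut pre suf sep hpre]
        simp
      · rw [pvAltGo, dif_neg h, pvA_no_sep _ _ h]

-- ===== VERDICT (by name: the statement is the Claim_ definition above) =====
theorem shard_sequence_using_eos_spec : Claim_equal_shard_sequence_using_eos := by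
  intro input sep _
  show shard_sequence_using_eos input sep = shard_sequence_using_eos_alt input sep
  rw [shard_sequence_using_eos_alt, pvAltGo_eq sep input.length input (le_refl _) []]
  rfl
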